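-- pv_equiv track=rewrite | github.com/GreenMemory16/FP-2021-2022 | Project 1/Code.py | verificar_caracteres
-- ===== SOURCE A (Python) =====
-- def verificar_caracteres(senha):
--     """
--     verificar_caracteres: cad de caracteres -> inteiros
--
--     Verifica se a senha tem 3 vogais e 2 caracteres iguais consecutivos
--     e retorna o número de vogais e uma variável interruptor que assinala os dois
--     caracteres consecutivos
--     """
--     n = 0
--     m = False
--     antes = ''
--     for i in senha:
--         if i in ('a', 'e', 'i', 'o', 'u'):
--             n += 1
--         if antes == i:
--             m = True
--         antes = i
--
--     return n, m
-- ===== SOURCE B (Python) =====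
-- def verificar_caracteres(senha):
--     # histogram of characters built once; vowel total read off it,
--     # consecutive duplicates found as a doubled substring c+c
--     freq = {}
--     for c in senha:
--         freq[c] = freq.get(c, 0) + 1
--     n = freq.get('a', 0) + freq.get('e', 0) + freq.get('i', 0) + freq.get('o', 0) + freq.get('u', 0)
--     m = any(c + c in senha for c in freq)
--     return n, m
-- ===== Notes on version B (the rewrite author's own statement) =====
-- stated objective: alternative
-- what changed: Replaced A's single stateful scan (vowel membership test plus an 'antes' previous-character variable) by a character histogram dict whose vowel entries are summed, and a doubled-substring search c+c over the distinct characters for the consecutive-duplicate flag.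
import Mathlib
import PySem

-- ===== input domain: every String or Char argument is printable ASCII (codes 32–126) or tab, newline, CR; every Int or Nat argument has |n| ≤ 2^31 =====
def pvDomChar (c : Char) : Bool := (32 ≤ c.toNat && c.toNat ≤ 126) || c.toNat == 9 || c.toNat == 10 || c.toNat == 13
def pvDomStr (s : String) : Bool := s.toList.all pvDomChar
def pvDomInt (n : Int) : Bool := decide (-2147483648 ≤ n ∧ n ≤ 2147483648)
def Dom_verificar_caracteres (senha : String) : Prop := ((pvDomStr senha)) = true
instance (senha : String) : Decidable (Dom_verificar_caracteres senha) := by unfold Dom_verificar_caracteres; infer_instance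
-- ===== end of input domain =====

-- B replaces A's single stateful scan by a character histogram (vowel entries summed) and a doubled-substring search c+c over the distinct characters (objective: alternative).

-- ===== PORT A =====
-- i in ('a','e','i','o','u')
def pvIsVowel (c : Char) : Bool := c == 'a' || c == 'e' || c == 'i' || c == 'o' || c == 'u'

-- A's 'antes' starts as '' (matches no single character), then holds the previous character: Option Char, none at start.
def verificar_caracteres (senha : String) : Int × Bool :=
  let st := senha.toList.foldl
    (fun (st : Int × Bool × Option Char) i =>
      let n := if pvIsVowel i then st.1 + 1 else st.1
      let m := if st.2.2 == some i then true else st.2.1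
      (n, m, some i))
    (0, false, none)
  (st.1, st.2.1)

-- ===== PORT B =====
def verificar_caracteres_alt (senha : String) : Int × Bool :=
  let freq : PySem.Dict Char Int :=
    senha.toList.foldl (fun d c => d.insert c (d.getD c 0 + 1)) PySem.Dict.empty
  let n : Int := freq.getD 'a' 0 + freq.getD 'e' 0 + freq.getD 'i' 0 + freq.getD 'o' 0 + freq.getD 'u' 0
  let m : Bool := (PySem.Dict.keys freq).any (fun c => PySem.Str.isIn (String.ofList [c, c]) senha)
  (n, m)

-- ===== PRECONDITION & SPEC =====
def Spec_verificar_caracteres (senha : String) (out : Int × Bool) : Prop := out = verificar_caracteres_alt senha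
instance (senha : String) (out : Int × Bool) : Decidable (Spec_verificar_caracteres senha out) := by unfold Spec_verificar_caracteres; infer_instance

-- ===== CLAIM (what is proved, stated in full; the proofs are below) =====
def Claim_equal_verificar_caracteres : Prop := ∀ (senha : String), Dom_verificar_caracteres senha → Spec_verificar_caracteres senha (verificar_caracteres senha)

-- ===== LEMMAS AND PROOFS =====

-- adjacency from a given previous character, the invariant shape of A's 'm'
def pvAdjFrom : Option Char → List Char → Bool
  | _, [] => false
  | prev, c :: cs => (prev == some c) || pvAdjFrom (some c) cs

theorem pvLoopA (l : List Char) (n : Int) (m : Bool) (prev : Option Char) :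
    l.foldl
      (fun (st : Int × Bool × Option Char) i =>
        let n := if pvIsVowel i then st.1 + 1 else st.1
        let m := if st.2.2 == some i then true else st.2.1
        (n, m, some i))
      (n, m, prev)
    = (n + (l.countP pvIsVowel : Nat), m || pvAdjFrom prev l,
       l.foldl (fun _ c => some c) prev) := by
  induction l generalizing n m prev with
  | nil => simp [pvAdjFrom]
  | cons c cs ih =>
    simp only [List.foldl_cons, ih, pvAdjFrom, List.countP_cons, Prod.mk.injEq]
    refine ⟨?_, ?_, trivial⟩
    · by_cases h : pvIsVowel c = true
      · simp [h]; ring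
      · simp [h]
    · by_cases h : (prev == some c) = true
      · simp [h]
      · simp [h]

-- countP of the vowel predicate is the sum of the five character counts
theorem pvVowelSplit (l : List Char) :
    l.countP pvIsVowel = l.count 'a' + l.count 'e' + l.count 'i' + l.count 'o' + l.count 'u' := by
  induction l with
  | nil => simp
  | cons c cs ih =>
    simp only [List.countP_cons, List.count_cons, ih, pvIsVowel]
    by_cases ha : c = 'a' <;> by_cases he : c = 'e' <;> by_cases hi : c = 'i' <;>
      by_cases ho : c = 'o' <;> by_cases hu : c = 'u' <;> simp_all <;> omega

-- A's adjacency flag is sound: it reports the previous character repeating at the head, or a doubled character inside l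
theorem pvAdjFrom_sound (l : List Char) (prev : Option Char) (h : pvAdjFrom prev l = true) :
    (∃ c, prev = some c ∧ l.head? = some c) ∨ ∃ c, [c, c] <:+: l := by
  induction l generalizing prev with
  | nil => simp [pvAdjFrom] at h
  | cons a as ih =>
    simp only [pvAdjFrom, Bool.or_eq_true, beq_iff_eq] at h
    rcases h with h | h
    · exact Or.inl ⟨a, h, rfl⟩
    · rcases ih (some a) h with ⟨c, hc, hh⟩ | ⟨c, hc⟩
      · right
        obtain rfl : a = c := by simpa using hc
        cases as with
        | nil => simp at hh
        | cons b bs =>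
          simp only [List.head?_cons, Option.some.injEq] at hh
          subst hh
          exact ⟨b, List.IsPrefix.isInfix ⟨bs, rfl⟩⟩
      · exact Or.inr ⟨c, hc.trans (List.infix_cons List.infix_rfl)⟩

-- A's adjacency flag is complete: any doubled character sets it, whatever the previous character was
theorem pvAdjFrom_complete (l : List Char) (prev : Option Char) (c : Char)
    (h : [c, c] <:+: l) : pvAdjFrom prev l = true := by
  induction l generalizing prev with
  | nil =>
    have := h.length_le
    simp at this
  | cons a as ih =>
    simp only [pvAdjFrom, Bool.or_eq_true, beq_iff_eq]
    rcases List.infix_cons_iff.1 h with hpre | hinf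
    · rcases hpre with ⟨t, ht⟩
      rw [List.cons_append, List.cons_append, List.nil_append] at ht
      injection ht with h1 h2
      subst h1
      subst h2
      right
      simp [pvAdjFrom]
    · exact Or.inr (ih (some a) hinf)

theorem pvDouble_mem {l : List Char} {c : Char} (h : [c, c] <:+: l) : c ∈ l :=
  h.subset (by simp)

-- ===== VERDICT (by name: the statement is the Claim_ definition above) =====
theorem verificar_caracteres_spec : Claim_equal_verificar_caracteres := by
  intro senha _
  unfold Spec_verificar_caracteres verificar_caracteres verificar_caracteres_alt
  simp only [pvLoopA]
  rw [PySem.Dict.foldl_insert_getD_add_one_eq_counter]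
  simp only [PySem.Dict.getD_counter, PySem.Dict.keys_counter]
  refine Prod.ext ?_ ?_
  · simp [pvVowelSplit]
  · simp only [Bool.false_or]
    rw [← Bool.coe_iff_coe]
    simp only [List.any_eq_true, PySem.Set.mem_ofList, PySem.Str.isIn_iff_infix,
      String.toList_ofList]
    constructor
    · intro h
      rcases pvAdjFrom_sound _ _ h with ⟨c, hc, -⟩ | ⟨c, hc⟩
      · exact absurd hc (by simp)
      · exact ⟨c, pvDouble_mem hc, hc⟩
    · rintro ⟨c, -, h⟩
      exact pvAdjFrom_complete _ _ c h
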